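-- pv_equiv track=rewrite | github.com/Acquarts/funndication-bookings | main.py | buscar_en_texto
-- ===== SOURCE A (Python) =====
-- def buscar_en_texto(texto, pregunta):
--     """Busca información relevante en el texto para responder una pregunta"""
--     if not texto or len(texto.strip()) == 0:
--         return "No hay texto para analizar."
--
--     # Convertir a minúsculas para búsqueda
--     texto_lower = texto.lower()
--     pregunta_lower = pregunta.lower()
--
--     # Palabras clave de la pregunta
--     palabras_pregunta = pregunta_lower.split()
--     palabras_relevantes = [p for p in palabras_pregunta if len(p) > 2]
--
--     # Dividir texto en oraciones
--     oraciones = texto.replace('\n', ' ').split('.')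
--     oraciones = [o.strip() for o in oraciones if len(o.strip()) > 10]
--
--     # Buscar oraciones que contengan palabras clave
--     oraciones_relevantes = []
--     for oracion in oraciones:
--         oracion_lower = oracion.lower()
--         coincidencias = sum(1 for palabra in palabras_relevantes if palabra in oracion_lower)
--         if coincidencias > 0:
--             oraciones_relevantes.append((oracion, coincidencias))
--
--     if not oraciones_relevantes:
--         return "No encontré información específica sobre esa pregunta en el PDF."
--
--     # Ordenar por relevancia y tomar las mejores
--     oraciones_relevantes.sort(key=lambda x: x[1], reverse=True)
--     mejores_oraciones = [o[0] for o in oraciones_relevantes[:3]]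
--
--     return '. '.join(mejores_oraciones) + '.'
-- ===== SOURCE B (Python) =====
-- def buscar_en_texto(texto, pregunta):
--     """Busca informacion relevante en el texto para responder una pregunta"""
--     if not texto or len(texto.strip()) == 0:
--         return "No hay texto para analizar."
--
--     palabras_relevantes = [p for p in pregunta.lower().split() if len(p) > 2]
--
--     oraciones = [o.strip() for o in texto.replace('\n', ' ').split('.')
--                  if len(o.strip()) > 10]
--
--     # One (sentence, match-count) pair per sentence, in text order
--     pares = [(o, sum(1 for p in palabras_relevantes if p in o.lower()))
--              for o in oraciones]
--
--     tope = max((n for _, n in pares), default=0)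
--     if tope == 0:
--         return "No encontré información específica sobre esa pregunta en el PDF."
--
--     # Counting-sort style: emit sentences bucketed by match count, highest first,
--     # keeping text order inside each count (matches the stable reverse sort).
--     mejores = []
--     for c in range(tope, 0, -1):
--         mejores.extend(o for o, n in pares if n == c)
--
--     return '. '.join(mejores[:3]) + '.'
-- ===== Notes on version B (the rewrite author's own statement) =====
-- stated objective: alternative
-- what changed: Replaces the stable comparison sort of (sentence,count) pairs by a counting-sort style pass: compute the maximum match count and emit sentences bucketed per count from highest down, preserving text order inside each bucket.
import Mathlib
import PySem

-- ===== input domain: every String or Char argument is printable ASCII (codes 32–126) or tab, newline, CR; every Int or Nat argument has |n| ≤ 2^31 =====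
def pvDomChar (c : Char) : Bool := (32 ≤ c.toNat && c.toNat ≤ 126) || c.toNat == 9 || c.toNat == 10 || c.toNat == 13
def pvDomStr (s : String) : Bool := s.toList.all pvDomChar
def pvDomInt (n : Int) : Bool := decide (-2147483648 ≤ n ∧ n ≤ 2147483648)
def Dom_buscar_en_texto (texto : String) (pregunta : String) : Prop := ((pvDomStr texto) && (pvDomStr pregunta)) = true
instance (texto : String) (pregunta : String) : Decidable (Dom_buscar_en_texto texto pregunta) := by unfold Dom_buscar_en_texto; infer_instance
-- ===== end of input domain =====

-- B replaces the stable reverse sort of (sentence, count) pairs by a counting-sort style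
-- emission of per-count buckets from the maximum count down (objective: alternative).

-- ===== PORT A =====
def buscar_en_texto (texto : String) (pregunta : String) : String :=
  if texto = "" ∨ PySem.Str.len (PySem.Str.strip texto) = 0 then
    "No hay texto para analizar."
  else
    let _texto_lower := PySem.Str.lower texto
    let pregunta_lower := PySem.Str.lower pregunta
    let palabras_pregunta := PySem.Str.split₀ pregunta_lower
    let palabras_relevantes := palabras_pregunta.filter (fun p => decide (2 < PySem.Str.len p))
    let oraciones0 := (PySem.Str.split? (PySem.Str.replace texto "\n" " ") ".").getD []
    let oraciones := (oraciones0.filter (fun o => decide (10 < PySem.Str.len (PySem.Str.strip o)))).map PySem.Str.strip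
    let oraciones_relevantes := oraciones.foldl (fun acc oracion =>
      let oracion_lower := PySem.Str.lower oracion
      let coincidencias : Int := (palabras_relevantes.map (fun palabra => if PySem.Str.isIn palabra oracion_lower then (1 : Int) else 0)).sum
      if 0 < coincidencias then acc ++ [(oracion, coincidencias)] else acc) []
    if oraciones_relevantes = [] then
      "No encontré información específica sobre esa pregunta en el PDF."
    else
      let ordenadas := PySem.List.sorted oraciones_relevantes (fun x => x.2) true
      let mejores := (PySem.List.slice ordenadas none (some 3)).map (fun x => x.1)
      PySem.Str.join ". " mejores ++ "."

-- ===== PORT B =====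
def buscar_en_texto_alt (texto : String) (pregunta : String) : String :=
  if texto = "" ∨ PySem.Str.len (PySem.Str.strip texto) = 0 then
    "No hay texto para analizar."
  else
    let palabras_relevantes := (PySem.Str.split₀ (PySem.Str.lower pregunta)).filter (fun p => decide (2 < PySem.Str.len p))
    let oraciones := (((PySem.Str.split? (PySem.Str.replace texto "\n" " ") ".").getD []).filter
        (fun o => decide (10 < PySem.Str.len (PySem.Str.strip o)))).map PySem.Str.strip
    let pares := oraciones.map (fun o =>
        (o, ((palabras_relevantes.map (fun p => if PySem.Str.isIn p (PySem.Str.lower o) then (1 : Int) else 0)).sum)))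
    let tope := PySem.List.maxD (pares.map (fun x => x.2)) (fun n => n) 0
    if tope = 0 then
      "No encontré información específica sobre esa pregunta en el PDF."
    else
      let mejores := (PySem.List.pyRange tope 0 (-1)).foldl
          (fun acc c => acc ++ (pares.filter (fun x => decide (x.2 = c))).map (fun x => x.1)) []
      PySem.Str.join ". " (PySem.List.slice mejores none (some 3)) ++ "."

-- ===== PRECONDITION & SPEC =====
def Spec_buscar_en_texto (texto : String) (pregunta : String) (out : String) : Prop := out = buscar_en_texto_alt texto pregunta
instance (texto : String) (pregunta : String) (out : String) : Decidable (Spec_buscar_en_texto texto pregunta out) := by unfold Spec_buscar_en_texto; infer_instance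

-- ===== CLAIM (what is proved, stated in full; the proofs are below) =====
def Claim_equal_buscar_en_texto : Prop := ∀ (texto : String) (pregunta : String), Dom_buscar_en_texto texto pregunta → Spec_buscar_en_texto texto pregunta (buscar_en_texto texto pregunta)

-- ===== LEMMAS AND PROOFS =====

-- the per-sentence keyword match count shared by both ports
def pvCnt (ws : List String) (o : String) : Int :=
  (ws.map (fun p => if PySem.Str.isIn p (PySem.Str.lower o) then (1 : Int) else 0)).sum

theorem pvCnt_nonneg (ws : List String) (o : String) : 0 ≤ pvCnt ws o := by
  rw [pvCnt, PySem.List.sum_map_ite_one_zero]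
  exact Int.natCast_nonneg _

theorem insertBy_append_of_not_before {α : Type} (before : α → α → Bool) (x : α)
    (P S : List α) (h : ∀ y ∈ P, before x y = false) :
    PySem.List.insertBy before x (P ++ S) = P ++ PySem.List.insertBy before x S := by
  induction P with
  | nil => rfl
  | cons p P ih =>
    have hp : before x p = false := h p (by simp)
    simp only [List.cons_append, PySem.List.insertBy, hp, Bool.false_eq_true, if_false]
    rw [ih (fun y hy => h y (by simp [hy]))]

theorem sorted_rev_split_max {α : Type} (key : α → Int) (t : Int) (xs : List α)
    (h : ∀ x ∈ xs, key x ≤ t) :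
    PySem.List.sorted xs key true =
      xs.filter (fun x => decide (key x = t)) ++
        PySem.List.sorted (xs.filter (fun x => decide (key x ≠ t))) key true := by
  induction xs using List.reverseRecOn with
  | nil => simp [PySem.List.sorted]
  | append_singleton ys x ih =>
    have hys : ∀ y ∈ ys, key y ≤ t := fun y hy => h y (by simp [hy])
    have hx : key x ≤ t := h x (by simp)
    have hstep : PySem.List.sorted (ys ++ [x]) key true =
        PySem.List.insertBy (fun a b => decide (key b < key a)) x (PySem.List.sorted ys key true) := by
      rw [PySem.List.sorted_rev_eq_foldl_insertBy, PySem.List.sorted_rev_eq_foldl_insertBy,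
        List.foldl_append]
      simp
    rw [hstep, ih hys, List.filter_append, List.filter_append]
    by_cases hxt : key x = t
    · have hF : ∀ y ∈ ys.filter (fun y => decide (key y = t)),
          (fun a b => decide (key b < key a)) x y = false := by
        intro y hy
        have := (List.mem_filter.mp hy).2
        simp at this ⊢
        omega
      rw [insertBy_append_of_not_before _ _ _ _ hF]
      have hR : PySem.List.insertBy (fun a b => decide (key b < key a)) x
          (PySem.List.sorted (ys.filter (fun y => decide (key y ≠ t))) key true) =
          x :: PySem.List.sorted (ys.filter (fun y => decide (key y ≠ t))) key true := by
        cases hRv : PySem.List.sorted (ys.filter (fun y => decide (key y ≠ t))) key true with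
        | nil => rfl
        | cons r rs =>
          have hr : r ∈ ys.filter (fun y => decide (key y ≠ t)) := by
            rw [← PySem.List.mem_sorted (ys.filter (fun y => decide (key y ≠ t))) key true]
            rw [hRv]; simp
          have h1 := hys r (List.mem_filter.mp hr).1
          have h2 := (List.mem_filter.mp hr).2
          simp at h2
          have : key r < key x := by omega
          simp [PySem.List.insertBy, this]
      rw [hR]
      simp [hxt]
    · have hF : ∀ y ∈ ys.filter (fun y => decide (key y = t)),
          (fun a b => decide (key b < key a)) x y = false := by
        intro y hy
        have := (List.mem_filter.mp hy).2
        simp at this ⊢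
        omega
      rw [insertBy_append_of_not_before _ _ _ _ hF]
      have hend : PySem.List.sorted (ys.filter (fun y => !decide (key y = t)) ++ [x]) key true =
          PySem.List.insertBy (fun a b => decide (key b < key a)) x
            (PySem.List.sorted (ys.filter (fun y => !decide (key y = t))) key true) := by
        rw [PySem.List.sorted_rev_eq_foldl_insertBy, PySem.List.sorted_rev_eq_foldl_insertBy,
          List.foldl_append]
        simp
      simp only [List.filter_cons, List.filter_nil, decide_not]
      simp [hxt]
      rw [hend]

theorem pyRange_down (n : Nat) :
    PySem.List.pyRange (n : Int) 0 (-1) = (List.range n).map (fun k : Nat => (n : Int) - (k : Int)) := by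
  cases n with
  | zero => simp [PySem.List.pyRange]
  | succ m =>
    simp only [PySem.List.pyRange]
    rw [if_neg (by norm_num), if_neg (by norm_num), if_pos (by positivity : (0:Int) < ((m+1:Nat) : Int))]
    have h1 : ((((m+1:Nat):Int) - 0 + - -1 - 1) / - -1).toNat = m + 1 := by norm_num
    rw [h1]
    apply List.map_congr_left
    intro k _
    push_cast
    ring

theorem max?_cons_cons (x y : Int) (t : List Int) :
    PySem.List.max? (x :: y :: t) (fun n => n) =
      PySem.List.max? ((if x < y then y else x) :: t) (fun n => n) := by
  by_cases h : x < y <;> simp [PySem.List.max?, h]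

theorem max?_aux (t : List Int) : ∀ (x : Int),
    ∃ m', PySem.List.max? (x :: t) (fun n => n) = some m'
      ∧ (m' = x ∨ m' ∈ t) ∧ x ≤ m' ∧ ∀ y ∈ t, y ≤ m' := by
  induction t with
  | nil => exact fun x => ⟨x, rfl, .inl rfl, le_refl _, by simp⟩
  | cons y t ih =>
    intro x
    obtain ⟨m', h1, h2, h3, h4⟩ := ih (if x < y then y else x)
    refine ⟨m', by rw [max?_cons_cons, h1], ?_, ?_, ?_⟩
    · rcases h2 with h2 | h2
      · split at h2 <;> simp [h2]
      · simp [h2]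
    · split at h3 <;> omega
    · intro z hz
      rcases List.mem_cons.mp hz with rfl | hz
      · split at h3 <;> omega
      · exact h4 z hz

theorem maxD_spec (ns : List Int) :
    (PySem.List.maxD ns (fun n => n) 0 = 0 ∧ ∀ y ∈ ns, y ≤ 0) ∨
      (PySem.List.maxD ns (fun n => n) 0 ∈ ns ∧ ∀ y ∈ ns, y ≤ PySem.List.maxD ns (fun n => n) 0) := by
  cases ns with
  | nil => exact .inl ⟨rfl, by simp⟩
  | cons x t =>
    obtain ⟨m', h1, h2, h3, h4⟩ := max?_aux t x
    right
    have hmax : PySem.List.maxD (x :: t) (fun n => n) 0 = m' := by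
      rw [PySem.List.maxD, h1]
      rfl
    rw [hmax]
    refine ⟨?_, ?_⟩
    · rcases h2 with h2 | h2 <;> simp [h2]
    · intro y hy
      rcases List.mem_cons.mp hy with rfl | hy
      · exact h3
      · exact h4 y hy

theorem sorted_rev_eq_buckets {α : Type} (key : α → Int) :
    ∀ (n : Nat) (xs : List α), (∀ x ∈ xs, 1 ≤ key x ∧ key x ≤ (n : Int)) →
      PySem.List.sorted xs key true =
        ((List.range n).map (fun k : Nat => (n : Int) - (k : Int))).flatMap
          (fun c => xs.filter (fun x => decide (key x = c))) := by
  intro n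
  induction n with
  | zero =>
    intro xs h
    cases xs with
    | nil => simp [PySem.List.sorted]
    | cons x xs => have := h x (by simp); omega
  | succ n ih =>
    intro xs h
    rw [sorted_rev_split_max key ((n + 1 : Nat) : Int) xs (fun x hx => (h x hx).2)]
    have hxs' : ∀ x ∈ xs.filter (fun x => decide (key x ≠ ((n + 1 : Nat) : Int))), 1 ≤ key x ∧ key x ≤ (n : Int) := by
      intro x hx
      have h1 := h x (List.mem_filter.mp hx).1
      have h2 := (List.mem_filter.mp hx).2
      simp at h2
      push_cast at *
      omega
    rw [ih _ hxs']
    rw [List.range_succ_eq_map, List.map_cons, List.flatMap_cons]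
    congr 1
    rw [List.map_map]
    have hmaps : (List.map ((fun k : Nat => ((n + 1 : Nat) : Int) - (k : Int)) ∘ Nat.succ) (List.range n)) =
        (List.range n).map (fun k : Nat => (n : Int) - (k : Int)) := by
      apply List.map_congr_left
      intro k _
      simp only [Function.comp_apply]
      push_cast
      ring
    rw [hmaps]
    apply List.flatMap_congr
    intro c hc
    have hcb : 1 ≤ c ∧ c ≤ (n : Int) := by
      simp at hc
      obtain ⟨k, hk, rfl⟩ := hc
      omega
    rw [List.filter_filter]
    apply List.filter_congr
    intro x _
    by_cases hxc : key x = c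
    · simp [hxc]; omega
    · simp [hxc]

theorem branch_eq (ws os : List String) :
    (let rel := os.foldl (fun acc o =>
        if 0 < pvCnt ws o then acc ++ [(o, pvCnt ws o)] else acc) ([] : List (String × Int))
     if rel = [] then
       "No encontré información específica sobre esa pregunta en el PDF."
     else
       PySem.Str.join ". " ((PySem.List.slice (PySem.List.sorted rel (fun x => x.2) true) none (some 3)).map (fun x => x.1)) ++ ".")
  = (let pares := os.map (fun o => (o, pvCnt ws o))
     let tope := PySem.List.maxD (pares.map (fun x => x.2)) (fun n => n) 0
     if tope = 0 then
       "No encontré información específica sobre esa pregunta en el PDF."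
     else
       PySem.Str.join ". " (PySem.List.slice ((PySem.List.pyRange tope 0 (-1)).foldl
         (fun acc c => acc ++ (pares.filter (fun x => decide (x.2 = c))).map (fun x => x.1)) []) none (some 3)) ++ ".") := by
  have hrel : os.foldl (fun acc o =>
      if 0 < pvCnt ws o then acc ++ [(o, pvCnt ws o)] else acc) ([] : List (String × Int)) =
      (os.filter (fun o => decide (0 < pvCnt ws o))).map (fun o => (o, pvCnt ws o)) := by
    have h := PySem.List.foldl_append_if (fun o => decide (0 < pvCnt ws o))
      (fun o => (o, pvCnt ws o)) os []
    simpa using h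
  have hns : ((os.map (fun o => (o, pvCnt ws o))).map (fun x : String × Int => x.2)) =
      os.map (fun o => pvCnt ws o) := by simp
  dsimp only
  rw [hrel, hns]
  rcases maxD_spec (os.map (fun o => pvCnt ws o)) with ⟨ht, hb⟩ | ⟨htm, hb⟩
  · -- tope = 0 : all counts ≤ 0, both sides take the "not found" branch
    have hnil : os.filter (fun o => decide (0 < pvCnt ws o)) = [] := by
      rw [List.filter_eq_nil_iff]
      intro o ho
      have := hb (pvCnt ws o) (List.mem_map_of_mem ho)
      simp
      omega
    rw [hnil, ht]
    simp
  · -- tope ∈ counts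
    set tope := PySem.List.maxD (os.map (fun o => pvCnt ws o)) (fun n => n) 0 with htope
    obtain ⟨o₀, ho₀, hco₀⟩ := List.mem_map.mp htm
    have h0 : 0 ≤ tope := hco₀ ▸ pvCnt_nonneg ws o₀
    by_cases ht : tope = 0
    · -- counts may still all be ≤ 0
      have hnil : os.filter (fun o => decide (0 < pvCnt ws o)) = [] := by
        rw [List.filter_eq_nil_iff]
        intro o ho
        have := hb (pvCnt ws o) (List.mem_map_of_mem ho)
        simp
        omega
      rw [hnil, ht]
      simp
    · have htpos : 0 < tope := lt_of_le_of_ne h0 (Ne.symm ht)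
      have hmem : o₀ ∈ os.filter (fun o => decide (0 < pvCnt ws o)) := by
        rw [List.mem_filter]
        exact ⟨ho₀, by simp; omega⟩
      have hne : (os.filter (fun o => decide (0 < pvCnt ws o))).map (fun o => (o, pvCnt ws o)) ≠ [] := by
        intro hc
        rw [List.map_eq_nil_iff] at hc
        rw [hc] at hmem
        exact absurd hmem (List.not_mem_nil)
      rw [if_neg hne, if_neg ht]
      congr 1
      congr 1
      -- list equality
      rw [PySem.List.foldl_append_eq_flatMap, List.nil_append]
      rw [PySem.List.slice_to _ (by norm_num), PySem.List.slice_to _ (by norm_num)]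
      rw [List.map_take]
      congr 1
      -- core equality
      have htN : tope = ((tope.toNat : Nat) : Int) := (Int.toNat_of_nonneg h0).symm
      have hbounds : ∀ x ∈ (os.filter (fun o => decide (0 < pvCnt ws o))).map (fun o => (o, pvCnt ws o)),
          1 ≤ x.2 ∧ x.2 ≤ ((tope.toNat : Nat) : Int) := by
        intro x hx
        obtain ⟨o, ho, rfl⟩ := List.mem_map.mp hx
        have h1 := (List.mem_filter.mp ho).2
        have h2 := hb (pvCnt ws o) (List.mem_map_of_mem (List.mem_filter.mp ho).1)
        simp at h1
        constructor
        · omega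
        · rw [← htN]; exact h2
      rw [htN, pyRange_down]
      rw [sorted_rev_eq_buckets (fun x : String × Int => x.2) tope.toNat _ hbounds]
      rw [List.map_flatMap]
      apply List.flatMap_congr
      intro c hc
      have hc1 : 1 ≤ c := by
        simp at hc
        obtain ⟨k, hk, rfl⟩ := hc
        omega
      congr 1
      rw [List.filter_map, List.filter_map, List.filter_filter]
      congr 1
      apply List.filter_congr
      intro o _
      simp only [Function.comp]
      by_cases hoc : pvCnt ws o = c
      · simp [hoc]; omega
      · simp [hoc]

-- ===== VERDICT (by name: the statement is the Claim_ definition above) =====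
theorem buscar_en_texto_spec : Claim_equal_buscar_en_texto := by
  intro texto pregunta _
  unfold Spec_buscar_en_texto buscar_en_texto buscar_en_texto_alt
  by_cases h : texto = "" ∨ PySem.Str.len (PySem.Str.strip texto) = 0
  · rw [if_pos h, if_pos h]
  · rw [if_neg h, if_neg h]
    exact branch_eq _ _
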